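-- pv_equiv track=rewrite | github.com/sanskrit-lexicon/csl-inflect | verbs/pysanskritv2/manual/prf/merge_tables.py | significant_difference
-- ===== SOURCE A (Python) =====
-- def significant_difference(newform,oldforms):
--  def formset(form):
--   return set([x for x in form.split('/') if x != '?'])
--  newset = formset(newform)
--  oldsets = [formset(oldform) for oldform in oldforms]
--  n = len(oldsets)
--  for i1 in range(0,n):
--   oldset1 = oldsets[i1]
--   for i2 in range(i1+1,n):
--    oldset2 = oldsets[i2]
--    if oldset1.issubset(oldset2) or oldset2.issubset(oldset1):
--     pass
--    else:
--     # significant difference found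
--     return True
--  # no significant differences found
--  return False
-- ===== SOURCE B (Python) =====
-- def significant_difference(newform, oldforms):
--     # Sort the form-sets by size; all pairs are comparable under inclusion
--     # iff each consecutive pair (in size order) is a subset of the next.
--     sets = sorted((frozenset(x for x in f.split('/') if x != '?') for f in oldforms), key=len)
--     return any(not (a <= b) for a, b in zip(sets, sets[1:]))
-- ===== Notes on version B (the rewrite author's own statement) =====
-- stated objective: faster
-- what changed: Instead of testing all O(n^2) pairs for subset-comparability, B sorts the form-sets by size and checks only the n-1 consecutive pairs for subset (a family of sets is a chain under inclusion iff, ordered by size, each set is contained in the next).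
import Mathlib
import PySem

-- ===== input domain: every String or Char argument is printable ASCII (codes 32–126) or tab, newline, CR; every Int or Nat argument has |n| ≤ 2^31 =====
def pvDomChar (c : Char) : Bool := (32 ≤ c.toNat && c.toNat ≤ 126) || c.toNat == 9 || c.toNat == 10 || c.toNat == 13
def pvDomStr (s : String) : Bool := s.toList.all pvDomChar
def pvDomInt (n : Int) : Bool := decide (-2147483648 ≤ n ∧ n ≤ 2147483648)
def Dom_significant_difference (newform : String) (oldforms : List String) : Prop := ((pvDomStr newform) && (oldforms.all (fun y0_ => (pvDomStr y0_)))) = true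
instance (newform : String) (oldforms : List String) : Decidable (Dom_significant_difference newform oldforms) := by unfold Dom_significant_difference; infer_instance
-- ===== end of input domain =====

-- B replaces A's O(n^2) pairwise subset tests by a size-sort plus n-1 consecutive subset tests (a family of sets is a chain under inclusion iff, ordered by size, each set is contained in the next); equivalence proved below.

-- ===== PORT A =====
-- set([x for x in form.split('/') if x != '?'])
def pvFormset (form : String) : PySem.Set String :=
  PySem.Set.ofList (((PySem.Str.split? form "/").getD []).filter (fun x => x != "?"))  -- split? is none only for sep = ""; sep here is the literal "/"

-- inner loop 'for i2 in range(i1+1,n)': scans the elements after oldset1, returns True on an incomparable pair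
def pvInnerA (s1 : PySem.Set String) : List (PySem.Set String) → Bool
  | [] => false
  | s2 :: rest =>
    if PySem.Set.issubset s1 s2 || PySem.Set.issubset s2 s1 then pvInnerA s1 rest
    else true

-- outer loop 'for i1 in range(0,n)'
def pvOuterA : List (PySem.Set String) → Bool
  | [] => false
  | s1 :: rest => if pvInnerA s1 rest then true else pvOuterA rest

def significant_difference (newform : String) (oldforms : List String) : Bool :=
  let _newset := pvFormset newform   -- computed but never used by A
  let oldsets := oldforms.map pvFormset
  pvOuterA oldsets

-- ===== PORT B =====
-- any(not (a <= b) for a, b in zip(sets, sets[1:]))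
def pvChkB : List (PySem.Set String) → Bool
  | a :: b :: rest => !PySem.Set.issubset a b || pvChkB (b :: rest)
  | _ => false

def significant_difference_alt (newform : String) (oldforms : List String) : Bool :=
  pvChkB (PySem.List.sorted (oldforms.map pvFormset) (fun s => s.length) false)

-- ===== PRECONDITION & SPEC =====
def Spec_significant_difference (newform : String) (oldforms : List String) (out : Bool) : Prop := out = significant_difference_alt newform oldforms
instance (newform : String) (oldforms : List String) (out : Bool) : Decidable (Spec_significant_difference newform oldforms out) := by unfold Spec_significant_difference; infer_instance

-- ===== CLAIM (what is proved, stated in full; the proofs are below) =====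
def Claim_equal_significant_difference : Prop := ∀ (newform : String) (oldforms : List String), Dom_significant_difference newform oldforms → Spec_significant_difference newform oldforms (significant_difference newform oldforms)

-- ===== LEMMAS AND PROOFS =====

-- comparability relation tested by A
def pvCmp (a b : PySem.Set String) : Prop :=
  (PySem.Set.issubset a b || PySem.Set.issubset b a) = true

-- subset relation tested by B
def pvSub (a b : PySem.Set String) : Prop := PySem.Set.issubset a b = true

theorem pvCmp_symm : Symmetric pvCmp := by
  intro a b h; unfold pvCmp at *; rw [Bool.or_comm]; exact h

theorem pvSub_trans {a b c : PySem.Set String} (h1 : pvSub a b) (h2 : pvSub b c) : pvSub a c := by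
  unfold pvSub at *
  rw [PySem.Set.issubset_iff] at *
  exact fun x hx => h2 x (h1 x hx)

theorem pvSub_cmp {a b : PySem.Set String} (h : pvSub a b) : pvCmp a b := by
  unfold pvSub pvCmp at *; simp [h]

-- the size argument: comparable nodup sets with |a| ≤ |b| satisfy a ⊆ b
theorem pvCmp_to_sub {a b : PySem.Set String} (ha : a.Nodup) (hb : b.Nodup)
    (hlen : a.length ≤ b.length) (h : pvCmp a b) : pvSub a b := by
  unfold pvCmp at h
  rcases Bool.or_eq_true_iff.mp h with h1 | h2
  · exact h1
  · -- b ⊆ a and |a| ≤ |b|: the two finsets coincide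
    unfold pvSub
    rw [PySem.Set.issubset_iff] at h2 ⊢
    have hsub : b.toFinset ⊆ a.toFinset := by
      intro x hx
      simp only [List.mem_toFinset] at hx ⊢
      exact h2 x hx
    have hcard : a.toFinset.card ≤ b.toFinset.card := by
      rw [List.toFinset_card_of_nodup ha, List.toFinset_card_of_nodup hb]
      exact hlen
    have heq : b.toFinset = a.toFinset := Finset.eq_of_subset_of_card_le hsub hcard
    intro x hx
    have : x ∈ a.toFinset := List.mem_toFinset.mpr hx
    rw [← heq] at this
    exact List.mem_toFinset.mp this

theorem pvInnerA_false_iff (s1 : PySem.Set String) (l : List (PySem.Set String)) :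
    pvInnerA s1 l = false ↔ ∀ t ∈ l, pvCmp s1 t := by
  induction l with
  | nil => simp [pvInnerA]
  | cons s2 rest ih =>
    unfold pvInnerA
    by_cases h : (PySem.Set.issubset s1 s2 || PySem.Set.issubset s2 s1) = true
    · rw [if_pos h, ih]
      constructor
      · intro hall t ht
        rcases List.mem_cons.mp ht with rfl | ht'
        · exact h
        · exact hall t ht'
      · intro hall t ht
        exact hall t (List.mem_cons_of_mem _ ht)
    · rw [if_neg h]
      constructor
      · intro hf; cases hf
      · intro hall
        exact absurd (hall s2 (by simp)) h

theorem pvOuterA_false_iff (l : List (PySem.Set String)) :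
    pvOuterA l = false ↔ List.Pairwise pvCmp l := by
  induction l with
  | nil => simp [pvOuterA]
  | cons s1 rest ih =>
    unfold pvOuterA
    rw [List.pairwise_cons]
    by_cases h : pvInnerA s1 rest = true
    · rw [if_pos h]
      constructor
      · intro hf; cases hf
      · rintro ⟨hall, -⟩
        rw [(pvInnerA_false_iff s1 rest).mpr hall] at h
        cases h
    · have hf : pvInnerA s1 rest = false := by
        cases hv : pvInnerA s1 rest
        · rfl
        · exact absurd hv h
      rw [if_neg h, ih]
      exact ⟨fun hp => ⟨(pvInnerA_false_iff s1 rest).mp hf, hp⟩, fun hp => hp.2⟩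

-- combine two pairwise facts
theorem pvPairwise_and {α : Type} {R S : α → α → Prop} {l : List α}
    (hr : List.Pairwise R l) (hs : List.Pairwise S l) :
    List.Pairwise (fun a b => R a b ∧ S a b) l := by
  induction l with
  | nil => exact List.Pairwise.nil
  | cons a rest ih =>
    rw [List.pairwise_cons] at *
    exact ⟨fun b hb => ⟨hr.1 b hb, hs.1 b hb⟩, ih hr.2 hs.2⟩

theorem pvChkB_false_of_pairwise (l : List (PySem.Set String))
    (h : List.Pairwise pvSub l) : pvChkB l = false := by
  induction l with
  | nil => rfl
  | cons a rest ih =>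
    rw [List.pairwise_cons] at h
    cases rest with
    | nil => rfl
    | cons b t =>
      unfold pvChkB
      have hab : pvSub a b := h.1 b (by simp)
      unfold pvSub at hab
      rw [hab, ih h.2]
      rfl

theorem pvPairwise_of_chkB_false (l : List (PySem.Set String))
    (h : pvChkB l = false) : List.Pairwise pvSub l := by
  induction l with
  | nil => exact List.Pairwise.nil
  | cons a rest ih =>
    cases rest with
    | nil => simp
    | cons b t =>
      unfold pvChkB at h
      simp only [Bool.or_eq_false_iff, Bool.not_eq_false'] at h
      have hab : pvSub a b := h.1
      have htail : List.Pairwise pvSub (b :: t) := ih h.2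
      rw [List.pairwise_cons]
      refine ⟨?_, htail⟩
      intro c hc
      rcases List.mem_cons.mp hc with rfl | hct
      · exact hab
      · rw [List.pairwise_cons] at htail
        exact pvSub_trans hab (htail.1 c hct)

theorem pvNodup_mem_map (oldforms : List String) (s : PySem.Set String)
    (hs : s ∈ oldforms.map pvFormset) : s.Nodup := by
  rcases List.mem_map.mp hs with ⟨f, _, rfl⟩
  unfold pvFormset
  exact PySem.Set.nodup_ofList _

theorem pvMain (oldforms : List String) :
    pvOuterA (oldforms.map pvFormset)
      = pvChkB (PySem.List.sorted (oldforms.map pvFormset) (fun s => s.length) false) := by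
  set l := oldforms.map pvFormset with hl
  set L := PySem.List.sorted l (fun s => s.length) false with hL
  have hperm : L.Perm l := PySem.List.sorted_perm l (fun s => s.length) false
  have hlen : L.Pairwise (fun a b => a.length ≤ b.length) := PySem.List.sorted_pairwise l (fun s => s.length)
  have hnd : ∀ s ∈ L, s.Nodup := by
    intro s hs
    exact pvNodup_mem_map oldforms s (hperm.mem_iff.mp hs)
  -- pairwise comparable on l ↔ chain check false on L
  have key : List.Pairwise pvCmp l ↔ pvChkB L = false := by
    constructor
    · intro hp
      have hpL : List.Pairwise pvCmp L := (hperm.pairwise_iff @pvCmp_symm).mpr hp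
      have hboth := pvPairwise_and hpL hlen
      have hsubL : List.Pairwise pvSub L := by
        refine hboth.imp_of_mem ?_
        intro a b ha hb hab
        exact pvCmp_to_sub (hnd a ha) (hnd b hb) hab.2 hab.1
      exact pvChkB_false_of_pairwise L hsubL
    · intro hc
      have hsubL := pvPairwise_of_chkB_false L hc
      have hpL : List.Pairwise pvCmp L := hsubL.imp (fun h => pvSub_cmp h)
      exact (hperm.pairwise_iff @pvCmp_symm).mp hpL
  cases hA : pvOuterA l with
  | false =>
    have := (pvOuterA_false_iff l).mp hA
    exact ((key.mp this).symm)
  | true =>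
    cases hB : pvChkB L with
    | true => rfl
    | false =>
      have := key.mpr hB
      rw [(pvOuterA_false_iff l).mpr this] at hA
      exact absurd hA (by simp)

-- ===== VERDICT (by name: the statement is the Claim_ definition above) =====
theorem significant_difference_spec : Claim_equal_significant_difference := by
  intro newform oldforms _
  unfold Spec_significant_difference significant_difference significant_difference_alt
  exact pvMain oldforms
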